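-- pv_equiv track=rewrite | github.com/pypi-data/pypi-mirror-200 | packages/qrem/qrem-0.1.1.tar.gz/qrem-0.1.1/src/qrem/functions_qrem/ancillary_functions.py | get_classical_register_bitstrings
-- ===== SOURCE A (Python) =====
-- from typing import List, Dict, Optional, Callable, Tuple
--
-- def all_possible_bitstrings_of_length(number_of_bits: int,
--                 reversed: Optional[bool] = False):
--     """Generate outcome bitstrings for n-qubits.
--
--     Args:
--         number_of_qubits (int): the number of qubits.
--
--     Returns:
--         list: arrray_to_print list of bitstrings ordered as follows:
--         Example: n=2 returns ['00', '01', '10', '11'].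
-- """
--     if (reversed == True):
--         return [(bin(j)[2:].zfill(number_of_bits))[::-1] for j in list(range(2 ** number_of_bits))]
--     else:
--         return [(bin(j)[2:].zfill(number_of_bits)) for j in list(range(2 ** number_of_bits))]
--
-- def get_classical_register_bitstrings(qubit_indices: List[int],
--                                       quantum_register_size: Optional[int] = None,
--                                       rev: Optional[bool] = False):
--     """
--     Register of qubits of size quantum_register_size, with only bits corresponding to qubit_indices
--     Gets list of bitstrings of length quantum_register_size when only bits in qubit_indicies can be 0 and 1, others have to be 0
--
--     Qubits indices are always indexed from right to get proper output, use ref if you need a format with indexing from left.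
--
--     use rev when input indices were
--
--
--     varying
--
--     :param qubit_indices:
--     :param quantum_register_size:
--     :param rev:
--     :return:
--     """
--
--     # TODO FBM: refactor this function.
--
--     # again assumes that qubit_indices contains unique values
--     if quantum_register_size is None:
--         quantum_register_size = len(qubit_indices)
--
--     if quantum_register_size == 0:
--         return ['']
--
--     if quantum_register_size == 1:
--         return ['0', '1']
--
--     all_bitstrings= all_possible_bitstrings_of_length(quantum_register_size, rev)
--     not_used = []
--
--     for j in list(range(quantum_register_size)):
--         if j not in qubit_indices:
--             not_used.append(j)
--
--     bad_names = []
--     for bitstring in all_bitstrings: #0000111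
--         for k in (not_used):
--             rev_name = bitstring[::-1] #1110000 reverses order of string - why?
--             if rev_name[k] == '1':
--                 bad_names.append(bitstring)
--
--     relevant_names = []
--     for bitstring in all_bitstrings:
--         if bitstring not in bad_names:
--             relevant_names.append(bitstring)
--
--     return relevant_names
-- ===== SOURCE B (Python) =====
-- def get_classical_register_bitstrings(qubit_indices, quantum_register_size=None, rev=False):
--     """Enumerate register bitstrings where only the given qubit indices vary.
--
--     Product construction: walk the register columns from the least-significant
--     end, prepending '0' (and '1' where the column is free to vary) to every
--     suffix built so far; only the 2^k valid strings are ever produced, in the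
--     same order A emits them.
--     """
--     n = len(qubit_indices) if quantum_register_size is None else quantum_register_size
--     # free[c] == True iff column c (from the left of the standard bitstring) may be 1
--     if rev == True:
--         free = [c in qubit_indices for c in range(n)]
--     else:
--         free = [(n - 1 - c) in qubit_indices for c in range(n)]
--     suffixes = ['']
--     for varies in reversed(free):
--         if varies:
--             suffixes = ['0' + t for t in suffixes] + ['1' + t for t in suffixes]
--         else:
--             suffixes = ['0' + t for t in suffixes]
--     return [t[::-1] for t in suffixes] if rev == True else suffixes
-- ===== Notes on version B (the rewrite author's own statement) =====
-- stated objective: alternative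
-- what changed: A generates all 2^n register bitstrings, marks the bad ones by scanning every unused bit of every string against a bad-names list, and filters; B never builds the invalid strings: it walks the register columns once, prepending '0' (and '1' only where the column's qubit may vary) to every suffix built so far, producing exactly the 2^k valid strings in A's order.
-- intended difference: When the register size resolves to 1 and qubit 0 is not among the varying indices, A's 'size == 1' shortcut returns ['0', '1'] although bit 0 is supposed to stay 0; B returns the intended ['0']. — e.g. on get_classical_register_bitstrings([1], none, none): A returns ["0", "1"], B returns ["0"]
import Mathlib
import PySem

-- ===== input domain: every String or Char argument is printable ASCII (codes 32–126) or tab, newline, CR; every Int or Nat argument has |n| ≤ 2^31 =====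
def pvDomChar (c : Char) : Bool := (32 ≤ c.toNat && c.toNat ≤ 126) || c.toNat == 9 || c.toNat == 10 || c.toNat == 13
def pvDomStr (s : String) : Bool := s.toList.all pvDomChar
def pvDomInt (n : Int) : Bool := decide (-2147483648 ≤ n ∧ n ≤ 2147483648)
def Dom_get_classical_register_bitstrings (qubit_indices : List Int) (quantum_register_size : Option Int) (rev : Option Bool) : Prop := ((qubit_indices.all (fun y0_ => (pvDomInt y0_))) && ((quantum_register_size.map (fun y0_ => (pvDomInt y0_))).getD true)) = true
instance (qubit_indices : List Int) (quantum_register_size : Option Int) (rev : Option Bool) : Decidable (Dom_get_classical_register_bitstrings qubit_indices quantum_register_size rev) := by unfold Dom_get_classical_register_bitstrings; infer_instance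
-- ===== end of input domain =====

-- B enumerates only the 2^k valid assignments by a product construction over the register columns
-- (prepending '0'/'1' suffix-first), instead of A's generate-all-2^n-then-filter; return value only, no mutation.

-- ===== PORT A =====

-- Python bin(j)[2:] for 0 ≤ j (the only arguments A applies it to): MSB-first binary digits, hand-ported
-- (PySem has no bin); exact on nonnegative ints.
def pvBinAux : Nat → List Char
  | 0 => []
  | (k+1) => pvBinAux ((k+1)/2) ++ [if (k+1) % 2 == 1 then '1' else '0']
decreasing_by exact Nat.div_lt_self (Nat.succ_pos k) (by decide)

def pvBin (j : Int) : List Char := if j == 0 then ['0'] else pvBinAux j.toNat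

-- all_possible_bitstrings_of_length; strings are carried as List Char (PySem style), s[::-1] is List.reverse
-- (PySem.List.slice?_none_none_neg_one); 2 ** n is (2:Int)^n.toNat (exact for 0 ≤ n, which Pre_ guarantees).
def pvAllPossible (number_of_bits : Int) (reversed : Option Bool) : List (List Char) :=
  if reversed == some true then
    (PySem.List.pyRange 0 ((2:Int) ^ number_of_bits.toNat)).map
      (fun j => (PySem.Chars.zfill (pvBin j) number_of_bits).reverse)
  else
    (PySem.List.pyRange 0 ((2:Int) ^ number_of_bits.toNat)).map
      (fun j => PySem.Chars.zfill (pvBin j) number_of_bits)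

def get_classical_register_bitstrings (qubit_indices : List Int) (quantum_register_size : Option Int) (rev : Option Bool) : List String :=
  let n : Int := match quantum_register_size with | none => (qubit_indices.length : Int) | some k => k
  if n == 0 then [""]
  else if n == 1 then ["0", "1"]
  else
    let all_bitstrings := pvAllPossible n rev
    let not_used := (PySem.List.pyRange 0 n).foldl
      (fun acc j => if j ∉ qubit_indices then acc ++ [j] else acc) []
    -- rev_name[k]: k is a valid index whenever this branch runs (Python would raise otherwise)
    let bad_names := all_bitstrings.foldl
      (fun acc bitstring => not_used.foldl
        (fun acc2 k => if PySem.List.pyGet? bitstring.reverse k == some '1' then acc2 ++ [bitstring] else acc2)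
        acc) []
    ((all_bitstrings.foldl (fun acc bitstring => if bitstring ∉ bad_names then acc ++ [bitstring] else acc) []).map
      (fun cs => String.ofList cs))

-- ===== PORT B =====
def get_classical_register_bitstrings_alt (qubit_indices : List Int) (quantum_register_size : Option Int) (rev : Option Bool) : List String :=
  let n : Int := match quantum_register_size with | none => (qubit_indices.length : Int) | some k => k
  let free : List Bool :=
    if rev == some true then (PySem.List.pyRange 0 n).map (fun c => decide (c ∈ qubit_indices))
    else (PySem.List.pyRange 0 n).map (fun c => decide ((n - 1 - c) ∈ qubit_indices))
  let suffixes : List (List Char) := free.reverse.foldl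
    (fun acc b => if b then acc.map (fun t => '0' :: t) ++ acc.map (fun t => '1' :: t)
                  else acc.map (fun t => '0' :: t)) [[]]
  if rev == some true then suffixes.map (fun t => String.ofList t.reverse)
  else suffixes.map (fun t => String.ofList t)

-- ===== PRECONDITION & SPEC =====
-- Pre_ excludes exactly the inputs on which A raises: negative explicit register sizes
-- (2 ** n is a float, and range() of a float raises TypeError) and resolved sizes ≥ 63
-- (list(range(2 ** n)) raises OverflowError: the length exceeds C ssize_t).
def Pre_get_classical_register_bitstrings (qubit_indices : List Int) (quantum_register_size : Option Int) (rev : Option Bool) : Prop :=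
  0 ≤ quantum_register_size.getD (qubit_indices.length : Int) ∧
    quantum_register_size.getD (qubit_indices.length : Int) ≤ 62
instance (qubit_indices : List Int) (quantum_register_size : Option Int) (rev : Option Bool) : Decidable (Pre_get_classical_register_bitstrings qubit_indices quantum_register_size rev) := by unfold Pre_get_classical_register_bitstrings; infer_instance
def pvWitness_get_classical_register_bitstrings : List Int × Option Int × Option Bool := ([0, 2], some 3, some false)

-- When the register has size 1 but qubit 0 is not among the varying indices, A's 'size == 1' shortcut
-- returns ['0','1'] although bit 0 must stay 0; B returns the intended ['0'].
def D_get_classical_register_bitstrings (qubit_indices : List Int) (quantum_register_size : Option Int) (rev : Option Bool) : Prop :=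
  (quantum_register_size = some 1 ∨ (quantum_register_size = none ∧ qubit_indices.length = 1)) ∧ (0:Int) ∉ qubit_indices
instance (qubit_indices : List Int) (quantum_register_size : Option Int) (rev : Option Bool) : Decidable (D_get_classical_register_bitstrings qubit_indices quantum_register_size rev) := by unfold D_get_classical_register_bitstrings; infer_instance

def Spec_get_classical_register_bitstrings (qubit_indices : List Int) (quantum_register_size : Option Int) (rev : Option Bool) (out : List String) : Prop := ¬ D_get_classical_register_bitstrings qubit_indices quantum_register_size rev → out = get_classical_register_bitstrings_alt qubit_indices quantum_register_size rev
instance (qubit_indices : List Int) (quantum_register_size : Option Int) (rev : Option Bool) (out : List String) : Decidable (Spec_get_classical_register_bitstrings qubit_indices quantum_register_size rev out) := by unfold Spec_get_classical_register_bitstrings; infer_instance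

def pvDiffWitness_get_classical_register_bitstrings : List Int × Option Int × Option Bool := ([1], none, none)
def pvDiffWitnessOut_get_classical_register_bitstrings : (List String) × (List String) := (["0", "1"], ["0"])

-- ===== CLAIM (what is proved, stated in full; the proofs are below) =====
def Claim_unchanged_get_classical_register_bitstrings : Prop := ∀ (qubit_indices : List Int) (quantum_register_size : Option Int) (rev : Option Bool), Dom_get_classical_register_bitstrings qubit_indices quantum_register_size rev → Pre_get_classical_register_bitstrings qubit_indices quantum_register_size rev → Spec_get_classical_register_bitstrings qubit_indices quantum_register_size rev (get_classical_register_bitstrings qubit_indices quantum_register_size rev)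
def Claim_changed_get_classical_register_bitstrings : Prop := Dom_get_classical_register_bitstrings (pvDiffWitness_get_classical_register_bitstrings.1) (pvDiffWitness_get_classical_register_bitstrings.2.1) (pvDiffWitness_get_classical_register_bitstrings.2.2) ∧ Pre_get_classical_register_bitstrings (pvDiffWitness_get_classical_register_bitstrings.1) (pvDiffWitness_get_classical_register_bitstrings.2.1) (pvDiffWitness_get_classical_register_bitstrings.2.2) ∧ D_get_classical_register_bitstrings (pvDiffWitness_get_classical_register_bitstrings.1) (pvDiffWitness_get_classical_register_bitstrings.2.1) (pvDiffWitness_get_classical_register_bitstrings.2.2) ∧ get_classical_register_bitstrings (pvDiffWitness_get_classical_register_bitstrings.1) (pvDiffWitness_get_classical_register_bitstrings.2.1) (pvDiffWitness_get_classical_register_bitstrings.2.2) = pvDiffWitnessOut_get_classical_register_bitstrings.1 ∧ get_classical_register_bitstrings_alt (pvDiffWitness_get_classical_register_bitstrings.1) (pvDiffWitness_get_classical_register_bitstrings.2.1) (pvDiffWitness_get_classical_register_bitstrings.2.2) = pvDiffWitnessOut_get_classical_register_bitstrings.2 ∧ pvDiffWitnessOut_get_classical_register_bitstrings.1 ≠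 pvDiffWitnessOut_get_classical_register_bitstrings.2
def Claim_exact_get_classical_register_bitstrings : Prop := ∀ (qubit_indices : List Int) (quantum_register_size : Option Int) (rev : Option Bool), Dom_get_classical_register_bitstrings qubit_indices quantum_register_size rev → Pre_get_classical_register_bitstrings qubit_indices quantum_register_size rev → D_get_classical_register_bitstrings qubit_indices quantum_register_size rev → get_classical_register_bitstrings qubit_indices quantum_register_size rev ≠ get_classical_register_bitstrings_alt qubit_indices quantum_register_size rev

-- ===== LEMMAS AND PROOFS =====

-- all length-m bitstrings, MSB first, in numeric order
def pvGen : Nat → List (List Char)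
  | 0 => [[]]
  | (m+1) => (pvGen m).map (fun t => '0' :: t) ++ (pvGen m).map (fun t => '1' :: t)

-- product construction along a flag list: a '1' branch only where the flag is true
def pvGen2 : List Bool → List (List Char)
  | [] => [[]]
  | (b :: bs) => if b then (pvGen2 bs).map (fun t => '0' :: t) ++ (pvGen2 bs).map (fun t => '1' :: t)
                 else (pvGen2 bs).map (fun t => '0' :: t)

-- columns where the flag is false must hold '0'
def pvPredL : List Bool → List Char → Bool
  | _, [] => true
  | [], _ :: _ => true
  | (b :: bs), (c :: cs) => (b || c == '0') && pvPredL bs cs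

theorem pvGen_filter (bs : List Bool) : (pvGen bs.length).filter (fun t => pvPredL bs t) = pvGen2 bs := by
  induction bs with
  | nil => rfl
  | cons b bs ih =>
    simp only [List.length_cons, pvGen, pvGen2, List.filter_append, List.filter_map]
    have h0 : (fun t => pvPredL (b :: bs) t) ∘ (fun t => '0' :: t) = fun t => pvPredL bs t := by
      funext t; simp [pvPredL]
    have h1 : (fun t => pvPredL (b :: bs) t) ∘ (fun t => '1' :: t) = fun t => b && pvPredL bs t := by
      funext t; simp [pvPredL]
    rw [h0, h1]
    cases b with
    | true => simp [ih]
    | false => simp [ih]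

theorem pvGen2_eq_foldr (bs : List Bool) :
    bs.foldr (fun b acc => if b then acc.map (fun t => '0' :: t) ++ acc.map (fun t => '1' :: t)
                           else acc.map (fun t => '0' :: t)) [[]] = pvGen2 bs := by
  induction bs with
  | nil => rfl
  | cons b bs ih => simp [pvGen2, List.foldr_cons, ih]

theorem pvGen_length_mem {m : Nat} {t : List Char} (h : t ∈ pvGen m) : t.length = m := by
  induction m generalizing t with
  | zero => simp [pvGen] at h; simp [h]
  | succ m ih =>
    simp only [pvGen, List.mem_append, List.mem_map] at h
    rcases h with ⟨u, hu, rfl⟩ | ⟨u, hu, rfl⟩ <;> simp [ih hu]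

theorem pvGen_chars {m : Nat} {t : List Char} (h : t ∈ pvGen m) : ∀ c ∈ t, c = '0' ∨ c = '1' := by
  induction m generalizing t with
  | zero => simp [pvGen] at h; simp [h]
  | succ m ih =>
    simp only [pvGen, List.mem_append, List.mem_map] at h
    rcases h with ⟨u, hu, rfl⟩ | ⟨u, hu, rfl⟩ <;>
      · intro c hc
        rcases List.mem_cons.mp hc with rfl | hc'
        · simp
        · exact ih hu c hc'

theorem pvBinAux_step (k : Nat) (h : k ≠ 0) :
    pvBinAux k = pvBinAux (k / 2) ++ [if k % 2 == 1 then '1' else '0'] := by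
  cases k with
  | zero => exact absurd rfl h
  | succ k => rw [pvBinAux]

theorem pvBinAux_chars (k : Nat) : ∀ c ∈ pvBinAux k, c = '0' ∨ c = '1' := by
  induction k using Nat.strong_induction_on with
  | _ k ih =>
    cases k with
    | zero => simp [pvBinAux]
    | succ k =>
      rw [pvBinAux_step _ (Nat.succ_ne_zero k)]
      intro c hc
      rcases List.mem_append.mp hc with h | h
      · exact ih _ (Nat.div_lt_self (Nat.succ_pos k) (by decide)) c h
      · simp at h; split at h <;> simp [h]

theorem pvBin_chars (k : Nat) : ∀ c ∈ pvBin (k : Int), c = '0' ∨ c = '1' := by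
  unfold pvBin
  split
  · simp
  · simpa using pvBinAux_chars k

theorem pvBin_ne_nil (k : Nat) : pvBin (k : Int) ≠ [] := by
  unfold pvBin
  split
  · simp
  · rename_i h
    have hk : k ≠ 0 := by simpa using h
    rw [Int.toNat_natCast, pvBinAux_step k hk]
    simp

theorem pvZfill_digits (cs : List Char) (w : Int) (h0 : cs ≠ []) (h1 : ∀ c ∈ cs, c = '0' ∨ c = '1') :
    PySem.Chars.zfill cs w = List.replicate (w.toNat - cs.length) '0' ++ cs := by
  unfold PySem.Chars.zfill
  split
  · rename_i hle
    have : w.toNat ≤ cs.length := by omega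
    simp [Nat.sub_eq_zero_of_le this]
  · cases cs with
    | nil => exact absurd rfl h0
    | cons c rest =>
      have hc := h1 c (List.mem_cons_self)
      have : ¬(c = '+' ∨ c = '-') := by rcases hc with rfl | rfl <;> decide
      simp [this]

theorem pvZfill_of_le (cs : List Char) (w : Int) (h : w ≤ cs.length) : PySem.Chars.zfill cs w = cs := by
  unfold PySem.Chars.zfill
  simp [h]

theorem pvBinAux_length_le {k m : Nat} (h : k < 2 ^ m) : (pvBinAux k).length ≤ m := by
  induction k using Nat.strong_induction_on generalizing m with
  | _ k ih =>
    cases k with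
    | zero => simp [pvBinAux]
    | succ k =>
      rw [pvBinAux_step _ (Nat.succ_ne_zero k)]
      cases m with
      | zero => omega
      | succ m =>
        have h2 : (k + 1) / 2 < 2 ^ m := by
          have := Nat.pow_succ 2 m
          omega
        have := ih _ (Nat.div_lt_self (Nat.succ_pos k) (by decide)) h2
        simp [List.length_append]
        omega

theorem pvBin_length_le {k m : Nat} (hm : 1 ≤ m) (h : k < 2 ^ m) : (pvBin (k : Int)).length ≤ m := by
  unfold pvBin
  split
  · simpa
  · rw [Int.toNat_natCast]; exact pvBinAux_length_le h
theorem pvBin_lit_zero : pvBin ((0:Nat) : Int) = ['0'] := rfl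
theorem pvBin_lit_one : pvBin ((1:Nat) : Int) = ['1'] := by
  unfold pvBin
  rw [if_neg (by decide), Int.toNat_natCast, pvBinAux_step 1 (by omega)]
  simp [pvBinAux]
theorem pvBin_lit_two : pvBin ((2:Nat) : Int) = ['1', '0'] := by
  unfold pvBin
  rw [if_neg (by decide), Int.toNat_natCast, pvBinAux_step 2 (by omega), pvBinAux_step 1 (by omega)]
  simp [pvBinAux]
theorem pvBin_lit_three : pvBin ((3:Nat) : Int) = ['1', '1'] := by
  unfold pvBin
  rw [if_neg (by decide), Int.toNat_natCast, pvBinAux_step 3 (by omega), pvBinAux_step 1 (by omega)]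
  simp [pvBinAux]

theorem pvZfill_step {m k : Nat} (hm : 1 ≤ m) (hk : k < 2 ^ (m + 1)) :
    PySem.Chars.zfill (pvBin (k : Int)) ((m : Int) + 1) =
      PySem.Chars.zfill (pvBin ((k / 2 : Nat) : Int)) (m : Int) ++ [if k % 2 == 1 then '1' else '0'] := by
  have htop : ((m : Int) + 1).toNat = m + 1 := by omega
  have htm : ((m : Int)).toNat = m := by omega
  match k, hk with
  | 0, _ =>
    rw [show (0:Nat)/2 = 0 from rfl, pvBin_lit_zero]
    rw [pvZfill_digits ['0'] _ (by simp) (by simp), pvZfill_digits ['0'] _ (by simp) (by simp)]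
    rw [htop, htm]
    have e1 : m + 1 - ['0'].length = (m - 1) + 1 := by simp; omega
    have e2 : m - ['0'].length = m - 1 := by simp
    rw [e1, e2, List.replicate_succ']
    simp
  | 1, _ =>
    rw [show (1:Nat)/2 = 0 from rfl, pvBin_lit_zero, pvBin_lit_one]
    rw [pvZfill_digits ['1'] _ (by simp) (by simp), pvZfill_digits ['0'] _ (by simp) (by simp)]
    rw [htop, htm]
    have e1 : m + 1 - ['1'].length = (m - 1) + 1 := by simp; omega
    have e2 : m - ['0'].length = m - 1 := by simp
    rw [e1, e2, List.replicate_succ']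
    simp
  | (k+2), hk =>
    have hk2 : (k+2)/2 ≠ 0 := by omega
    have hbin : pvBin ((k+2 : Nat) : Int) = pvBinAux ((k+2)/2) ++ [if (k+2) % 2 == 1 then '1' else '0'] := by
      unfold pvBin
      rw [if_neg (by simp only [beq_iff_eq]; omega), Int.toNat_natCast, pvBinAux_step _ (by omega)]
    have hbin2 : pvBin (((k+2)/2 : Nat) : Int) = pvBinAux ((k+2)/2) := by
      unfold pvBin
      rw [if_neg (by simp only [beq_iff_eq, Int.natCast_eq_zero]; omega), Int.toNat_natCast]
    have hlen : (pvBinAux ((k+2)/2)).length ≤ m := by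
      apply pvBinAux_length_le
      have := Nat.pow_succ 2 m
      omega
    have hnil2 : pvBinAux ((k+2)/2) ≠ [] := by
      rw [pvBinAux_step _ hk2]
      simp
    rw [hbin, hbin2]
    rw [pvZfill_digits _ _ (by simp) (by
      intro c hc
      rcases List.mem_append.mp hc with h | h
      · exact pvBinAux_chars _ c h
      · simp at h; split at h <;> simp [h])]
    rw [pvZfill_digits _ _ hnil2 (pvBinAux_chars _)]
    rw [htop, htm, List.length_append, List.length_singleton]
    have : m + 1 - ((pvBinAux ((k+2)/2)).length + 1) = m - (pvBinAux ((k+2)/2)).length := by omega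
    rw [this, List.append_assoc]

theorem pvBin_top {m k : Nat} (hm : 1 ≤ m) (h : k < 2 ^ m) :
    pvBin ((2 ^ m + k : Nat) : Int) = '1' :: PySem.Chars.zfill (pvBin (k : Int)) (m : Int) := by
  induction m, hm using Nat.le_induction generalizing k with
  | base =>
    match k, h with
    | 0, _ =>
      rw [show 2^1 + 0 = 2 from rfl, pvBin_lit_two, pvBin_lit_zero]
      rw [pvZfill_of_le _ _ (by simp)]
    | 1, _ =>
      rw [show 2^1 + 1 = 3 from rfl, pvBin_lit_three, pvBin_lit_one]
      rw [pvZfill_of_le _ _ (by simp)]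
  | succ m hm ih =>
    have h2 : 2 ^ (m+1) = 2 * 2 ^ m := by ring
    have hN : 2 ^ (m+1) + k ≠ 0 := by positivity
    have hdiv : (2 ^ (m+1) + k) / 2 = 2 ^ m + k / 2 := by omega
    have hmod : (2 ^ (m+1) + k) % 2 = k % 2 := by omega
    have hbin : pvBin ((2 ^ (m+1) + k : Nat) : Int)
        = pvBinAux (2 ^ m + k / 2) ++ [if k % 2 == 1 then '1' else '0'] := by
      unfold pvBin
      rw [if_neg (by simp only [beq_iff_eq, Int.natCast_eq_zero]; exact hN), Int.toNat_natCast,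
        pvBinAux_step _ hN, hdiv, hmod]
    have hbin2 : pvBinAux (2 ^ m + k / 2) = pvBin ((2 ^ m + k / 2 : Nat) : Int) := by
      unfold pvBin
      rw [if_neg (by simp only [beq_iff_eq, Int.natCast_eq_zero]; positivity), Int.toNat_natCast]
    have hk2 : k / 2 < 2 ^ m := by omega
    rw [hbin, hbin2, ih hk2, List.cons_append]
    congr 1
    have hstep := pvZfill_step (m := m) (k := k) hm h
    rw [← hstep]
    norm_cast
theorem pvZfill_pad {m k : Nat} (hm : 1 ≤ m) (h : k < 2 ^ m) :
    PySem.Chars.zfill (pvBin (k : Int)) ((m : Int) + 1) = '0' :: PySem.Chars.zfill (pvBin (k : Int)) (m : Int) := by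
  have hlen := pvBin_length_le hm h
  rw [pvZfill_digits _ _ (pvBin_ne_nil k) (pvBin_chars k), pvZfill_digits _ _ (pvBin_ne_nil k) (pvBin_chars k)]
  have e1 : ((m : Int) + 1).toNat - (pvBin (k : Int)).length = (m - (pvBin (k : Int)).length) + 1 := by omega
  have e2 : ((m : Int)).toNat = m := by omega
  rw [e1, e2, List.replicate_succ]
  simp

theorem pvMap_zfill_gen (m : Nat) (hm : 1 ≤ m) :
    (List.range (2 ^ m)).map (fun (k : Nat) => PySem.Chars.zfill (pvBin (k : Int)) (m : Int)) = pvGen m := by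
  induction m, hm using Nat.le_induction with
  | base =>
    rw [show 2^1 = 2 from rfl, List.range_succ, List.range_succ, List.range_zero]
    simp only [List.map_append, List.map_cons, List.map_nil, List.nil_append]
    rw [pvBin_lit_zero, pvBin_lit_one, pvZfill_of_le _ _ (by simp), pvZfill_of_le _ _ (by simp)]
    rfl
  | succ m hm ih =>
    have hsplit : 2 ^ (m+1) = 2 ^ m + 2 ^ m := by ring
    rw [hsplit, List.range_add, List.map_append, List.map_map]
    have hfst : (List.range (2 ^ m)).map (fun (k : Nat) => PySem.Chars.zfill (pvBin (k : Int)) ((m+1 : Nat) : Int))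
        = (pvGen m).map (fun t => '0' :: t) := by
      rw [← ih, List.map_map]
      apply List.map_congr_left
      intro k hk
      have hk' : k < 2 ^ m := List.mem_range.mp hk
      simp only [Function.comp]
      rw [show ((m+1 : Nat) : Int) = (m : Int) + 1 by push_cast; ring]
      exact pvZfill_pad hm hk'
    have hsnd : (List.range (2 ^ m)).map ((fun (k : Nat) => PySem.Chars.zfill (pvBin (k : Int)) ((m+1 : Nat) : Int)) ∘ (fun x => 2 ^ m + x))
        = (pvGen m).map (fun t => '1' :: t) := by
      rw [← ih, List.map_map]
      apply List.map_congr_left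
      intro k hk
      have hk' : k < 2 ^ m := List.mem_range.mp hk
      simp only [Function.comp]
      have htop := pvBin_top hm hk'
      have hlen : ((m+1 : Nat) : Int) ≤ ('1' :: PySem.Chars.zfill (pvBin (k : Int)) (m : Int)).length := by
        rw [List.length_cons, PySem.Chars.length_zfill]
        have := pvBin_length_le hm hk'
        omega
      rw [show ((2^m + k : Nat) : Int) = ((2^m + k : Nat) : Int) from rfl, htop, pvZfill_of_le _ _ hlen]
    rw [hfst, hsnd]
    rfl
theorem pvPredL_false_iff (bs : List Bool) (t : List Char) (h : t.length = bs.length) :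
    pvPredL bs t = false ↔ ∃ i, i < bs.length ∧ bs.getD i true = false ∧ t.getD i ' ' ≠ '0' := by
  induction bs generalizing t with
  | nil =>
    cases t with
    | nil => simp [pvPredL]
    | cons c cs => simp at h
  | cons b bs ih =>
    cases t with
    | nil => simp at h
    | cons c cs =>
      simp only [List.length_cons, Nat.succ_inj] at h
      simp only [pvPredL, Bool.and_eq_false_iff, Bool.or_eq_false_iff]
      rw [ih cs h]
      constructor
      · rintro (⟨hb, hc⟩ | ⟨i, hi, hbi, hti⟩)
        · exact ⟨0, by simp, by simpa using hb, by simpa using hc⟩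
        · exact ⟨i + 1, by simpa using hi, by simpa using hbi, by simpa using hti⟩
      · rintro ⟨i, hi, hbi, hti⟩
        cases i with
        | zero => exact Or.inl ⟨by simpa using hbi, by simpa using hti⟩
        | succ i => exact Or.inr ⟨i, by simpa using hi, by simpa using hbi, by simpa using hti⟩
theorem pvFlags_getD (m i : Nat) (q : Nat → Bool) (hi : i < m) :
    ((List.range m).map (fun (j : Nat) => q j)).getD i true = q i := by
  have hlen : i < ((List.range m).map (fun j => q j)).length := by simpa using hi
  rw [List.getD_eq_getElem _ _ hlen]
  simp

theorem pvGet_rev (t : List Char) (m j : Nat) (hlen : t.length = m) (hj : j < m) :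
    PySem.List.pyGet? t.reverse ((j : Nat) : Int) = some (t.getD (m - 1 - j) ' ') := by
  subst hlen
  have h1 : j < t.reverse.length := by simpa
  rw [PySem.List.pyGet?_natCast, List.getElem?_eq_getElem h1, List.getElem_reverse h1,
    List.getD_eq_getElem _ _ (by omega : t.length - 1 - j < t.length)]

theorem pvKeep_nrev (m : Nat) (qi : List Int) (t : List Char) (hlen : t.length = m)
    (hch : ∀ c ∈ t, c = '0' ∨ c = '1') :
    (pvPredL ((List.range m).map (fun (i : Nat) => decide (((m:Int) - 1 - (i:Int)) ∈ qi))) t = false)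
      ↔ ∃ k : Int, (0 ≤ k ∧ k < (m:Int)) ∧ k ∉ qi ∧ PySem.List.pyGet? t.reverse k = some '1' := by
  rw [pvPredL_false_iff _ _ (by simpa using hlen)]
  constructor
  · rintro ⟨i, hi, hbi, hti⟩
    simp only [List.length_map, List.length_range] at hi
    rw [pvFlags_getD m i _ hi] at hbi
    have hmem : ((m:Int) - 1 - (i:Int)) ∉ qi := by simpa using hbi
    refine ⟨(m:Int) - 1 - (i:Int), ⟨by omega, by omega⟩, hmem, ?_⟩
    have hcast : (m:Int) - 1 - (i:Int) = ((m - 1 - i : Nat) : Int) := by omega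
    rw [hcast, pvGet_rev t m _ hlen (by omega)]
    have : m - 1 - (m - 1 - i) = i := by omega
    rw [this]
    have hti1 : t.getD i ' ' = '1' := by
      have hmem' : t.getD i ' ' ∈ t := List.getD_eq_getElem t ' ' (by omega : i < t.length) ▸ List.getElem_mem _
      rcases hch _ hmem' with h | h
      · exact absurd h hti
      · exact h
    rw [hti1]
  · rintro ⟨k, ⟨hk0, hkm⟩, hknot, hget⟩
    have hkk : k = ((k.toNat : Nat) : Int) := by omega
    have hkm' : k.toNat < m := by omega
    rw [hkk, pvGet_rev t m _ hlen hkm'] at hget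
    refine ⟨m - 1 - k.toNat, by simp; omega, ?_, ?_⟩
    · rw [pvFlags_getD m _ _ (by omega)]
      have : (m:Int) - 1 - ((m - 1 - k.toNat : Nat) : Int) = k := by omega
      simp only [this]
      simpa using hknot
    · simp only [Option.some_inj] at hget
      rw [hget]
      decide

theorem pvKeep_rev (m : Nat) (qi : List Int) (t : List Char) (hlen : t.length = m)
    (hch : ∀ c ∈ t, c = '0' ∨ c = '1') :
    (pvPredL ((List.range m).map (fun (i : Nat) => decide ((i:Int) ∈ qi))) t = false)
      ↔ ∃ k : Int, (0 ≤ k ∧ k < (m:Int)) ∧ k ∉ qi ∧ PySem.List.pyGet? t k = some '1' := by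
  rw [pvPredL_false_iff _ _ (by simpa using hlen)]
  constructor
  · rintro ⟨i, hi, hbi, hti⟩
    simp only [List.length_map, List.length_range] at hi
    rw [pvFlags_getD m i _ hi] at hbi
    refine ⟨(i:Int), ⟨by omega, by omega⟩, by simpa using hbi, ?_⟩
    rw [PySem.List.pyGet?_natCast, List.getElem?_eq_getElem (by omega : i < t.length)]
    have hti1 : t.getD i ' ' = '1' := by
      have hmem' : t.getD i ' ' ∈ t := List.getD_eq_getElem t ' ' (by omega : i < t.length) ▸ List.getElem_mem _
      rcases hch _ hmem' with h | h
      · exact absurd h hti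
      · exact h
    rw [← List.getD_eq_getElem t ' ' (by omega : i < t.length), hti1]
  · rintro ⟨k, ⟨hk0, hkm⟩, hknot, hget⟩
    have hkk : k = ((k.toNat : Nat) : Int) := by omega
    have hkm' : k.toNat < m := by omega
    rw [hkk, PySem.List.pyGet?_natCast, List.getElem?_eq_getElem (by omega : k.toNat < t.length)] at hget
    refine ⟨k.toNat, by simp; omega, ?_, ?_⟩
    · rw [pvFlags_getD m _ _ hkm']
      simp only [← hkk]
      simpa using hknot
    · simp only [Option.some_inj] at hget
      rw [List.getD_eq_getElem t ' ' (by omega : k.toNat < t.length), hget]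
      decide


theorem pvFoldlFilter {α : Type} (l : List α) (P : α → Prop) [DecidablePred P] :
    l.foldl (fun acc x => if P x then acc ++ [x] else acc) [] = l.filter (fun x => decide (P x)) := by
  have hf : (fun (acc : List α) (x : α) => if P x then acc ++ [x] else acc)
      = (fun acc x => if (fun x => decide (P x)) x = true then acc ++ [id x] else acc) := by
    funext acc x
    by_cases h : P x <;> simp [h]
  rw [hf, PySem.List.foldl_append_if (fun x => decide (P x)) id]
  simp

theorem pvBadFoldl (all : List (List Char)) (nu : List Int) :
    all.foldl (fun acc s => nu.foldl
        (fun acc2 k => if PySem.List.pyGet? s.reverse k == some '1' then acc2 ++ [s] else acc2) acc) []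
      = all.flatMap (fun s => (nu.filter (fun k => PySem.List.pyGet? s.reverse k == some '1')).map (fun _ => s)) := by
  rw [PySem.List.foldl_congr_mem all _
    (fun acc s => acc ++ (nu.filter (fun k => PySem.List.pyGet? s.reverse k == some '1')).map (fun _ => s)) []
    (by intro acc s hs; exact PySem.List.foldl_append_if _ _ _ _)]
  rw [PySem.List.foldl_append_eq_flatMap]
  simp

theorem pvMem_bad (all : List (List Char)) (nu : List Int) (t : List Char) :
    (t ∈ all.flatMap (fun s => (nu.filter (fun k => PySem.List.pyGet? s.reverse k == some '1')).map (fun _ => s)))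
      ↔ (t ∈ all ∧ ∃ k ∈ nu, PySem.List.pyGet? t.reverse k = some '1') := by
  simp only [List.mem_flatMap, List.mem_map, List.mem_filter]
  constructor
  · rintro ⟨s, hs, ⟨k, ⟨hk, hcond⟩, rfl⟩⟩
    exact ⟨hs, k, hk, by simpa using hcond⟩
  · rintro ⟨ht, k, hk, hcond⟩
    exact ⟨t, ht, ⟨k, ⟨hk, by simpa using hcond⟩, rfl⟩⟩

-- ===== VERDICT (by name: the statement is the Claim_ definition above) =====
theorem get_classical_register_bitstrings_spec : Claim_unchanged_get_classical_register_bitstrings := by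
  intro qi qrs rv _ hpre
  unfold Spec_get_classical_register_bitstrings
  intro hnd
  unfold D_get_classical_register_bitstrings at hnd
  unfold Pre_get_classical_register_bitstrings at hpre
  have hn : 0 ≤ (match qrs with | none => (qi.length : Int) | some k => k) := by
    cases qrs with
    | none => exact Int.natCast_nonneg _
    | some k => simpa using hpre.1
  unfold get_classical_register_bitstrings get_classical_register_bitstrings_alt
  generalize hN : (match qrs with | none => (qi.length : Int) | some k => k) = n at hn ⊢
  obtain ⟨M, rfl⟩ : ∃ m : Nat, n = (m : Int) := ⟨n.toNat, by omega⟩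
  clear hn hpre
  match M with
  | 0 =>
    cases (rv == some true) <;>
      simp [PySem.List.pyRange_one_eq_nil (le_refl (0:Int))]
  | 1 =>
    have hq : (0:Int) ∈ qi := by
      by_contra hq
      refine hnd ⟨?_, hq⟩
      cases qrs with
      | none =>
        refine Or.inr ⟨rfl, ?_⟩
        simp at hN
        exact hN
      | some k =>
        refine Or.inl ?_
        simp at hN
        rw [hN]
    cases (rv == some true) <;>
      simp [hq, PySem.List.pyRange_one, List.range_succ]
  | (m+2) =>
    have hM1 : 1 ≤ m + 2 := by omega
    have hif0 : ((((m+2):Nat):Int) == 0) = false := by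
      simp only [beq_eq_false_iff_ne, ne_eq]; omega
    have hif1 : ((((m+2):Nat):Int) == 1) = false := by
      simp only [beq_eq_false_iff_ne, ne_eq]; omega
    have hall : (PySem.List.pyRange 0 ((2:Int) ^ ((((m+2):Nat):Int)).toNat)).map
        (fun j => PySem.Chars.zfill (pvBin j) (((m+2):Nat):Int)) = pvGen (m+2) := by
      rw [Int.toNat_natCast, show ((2:Int) ^ (m+2)) = (((2 ^ (m+2) : Nat)) : Int) by push_cast; ring,
        PySem.List.pyRange_one, Int.sub_zero, Int.toNat_natCast, List.map_map]
      rw [show ((fun j => PySem.Chars.zfill (pvBin j) (((m+2):Nat):Int)) ∘ fun (k:Nat) => (0:Int) + ↑k)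
          = fun (k:Nat) => PySem.Chars.zfill (pvBin (k:Int)) (((m+2):Nat):Int) by funext k; simp]
      exact pvMap_zfill_gen (m+2) hM1
    have hmemnu : ∀ k : Int, k ∈ (PySem.List.pyRange 0 (((m+2):Nat):Int)).filter (fun j => decide (j ∉ qi))
        ↔ (0 ≤ k ∧ k < (((m+2):Nat):Int)) ∧ k ∉ qi := by
      intro k
      simp only [List.mem_filter, PySem.List.mem_pyRange_one, decide_eq_true_eq]
    cases hb : (rv == some true) with
    | false =>
      simp only [pvAllPossible, hb, Bool.false_eq_true, if_false, hif0, hif1]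
      rw [hall, pvFoldlFilter (PySem.List.pyRange 0 (((m+2):Nat):Int)) (fun j => j ∉ qi),
        pvBadFoldl, pvFoldlFilter (pvGen (m+2))]
      rw [List.foldl_reverse, pvGen2_eq_foldr]
      rw [show (PySem.List.pyRange 0 (((m+2):Nat):Int)).map (fun c => decide ((((m+2):Nat):Int) - 1 - c ∈ qi))
          = (List.range (m+2)).map (fun (i:Nat) => decide ((((m+2):Nat):Int) - 1 - (i:Int) ∈ qi)) by
        rw [PySem.List.pyRange_one, Int.sub_zero, Int.toNat_natCast, List.map_map]
        apply List.map_congr_left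
        intro k _
        simp]
      congr 1
      have hgf := pvGen_filter ((List.range (m+2)).map (fun (i:Nat) => decide ((((m+2):Nat):Int) - 1 - (i:Int) ∈ qi)))
      simp only [List.length_map, List.length_range] at hgf
      rw [← hgf]
      apply List.filter_congr
      intro t ht
      simp only [List.length_map, List.length_range] at ht ⊢
      have hlen := pvGen_length_mem ht
      have hch := pvGen_chars ht
      have hkeep := pvKeep_nrev (m+2) qi t hlen hch
      have hmem := pvMem_bad (pvGen (m+2))
        ((PySem.List.pyRange 0 (((m+2):Nat):Int)).filter (fun j => decide (j ∉ qi))) t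
      cases hp : pvPredL ((List.range (m+2)).map (fun (i:Nat) => decide ((((m+2):Nat):Int) - 1 - (i:Int) ∈ qi))) t with
      | false =>
        obtain ⟨k, hkb, hknot, hget⟩ := hkeep.mp hp
        have : t ∈ (pvGen (m+2)).flatMap (fun s => (((PySem.List.pyRange 0 (((m+2):Nat):Int)).filter (fun j => decide (j ∉ qi))).filter (fun k => PySem.List.pyGet? s.reverse k == some '1')).map (fun _ => s)) :=
          hmem.mpr ⟨ht, k, (hmemnu k).mpr ⟨hkb, hknot⟩, hget⟩
        exact decide_eq_false (fun h => h this)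
      | true =>
        have : t ∉ (pvGen (m+2)).flatMap (fun s => (((PySem.List.pyRange 0 (((m+2):Nat):Int)).filter (fun j => decide (j ∉ qi))).filter (fun k => PySem.List.pyGet? s.reverse k == some '1')).map (fun _ => s)) := by
          intro hin
          obtain ⟨-, k, hknu, hget⟩ := hmem.mp hin
          obtain ⟨hkb, hknot⟩ := (hmemnu k).mp hknu
          have : pvPredL ((List.range (m+2)).map (fun (i:Nat) => decide ((((m+2):Nat):Int) - 1 - (i:Int) ∈ qi))) t = false :=
            hkeep.mpr ⟨k, hkb, hknot, hget⟩
          rw [hp] at this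
          simp at this
        exact decide_eq_true this
    | true =>
      simp only [pvAllPossible, hb, if_true, hif0, hif1]
      rw [show (fun j => (PySem.Chars.zfill (pvBin j) (((m+2):Nat):Int)).reverse)
          = (List.reverse ∘ fun j => PySem.Chars.zfill (pvBin j) (((m+2):Nat):Int)) from rfl]
      rw [← List.map_map, hall]
      rw [pvFoldlFilter (PySem.List.pyRange 0 (((m+2):Nat):Int)) (fun j => j ∉ qi),
        pvBadFoldl, pvFoldlFilter ((pvGen (m+2)).map List.reverse)]
      rw [List.foldl_reverse, pvGen2_eq_foldr]
      rw [show (PySem.List.pyRange 0 (((m+2):Nat):Int)).map (fun c => decide (c ∈ qi))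
          = (List.range (m+2)).map (fun (i:Nat) => decide ((i:Int) ∈ qi)) by
        rw [PySem.List.pyRange_one, Int.sub_zero, Int.toNat_natCast, List.map_map]
        apply List.map_congr_left
        intro k _
        simp]
      rw [List.filter_map]
      have hgf := pvGen_filter ((List.range (m+2)).map (fun (i:Nat) => decide ((i:Int) ∈ qi)))
      simp only [List.length_map, List.length_range] at hgf
      trans ((pvGen2 ((List.range (m+2)).map (fun (i:Nat) => decide ((i:Int) ∈ qi)))).map
        List.reverse).map (fun cs => String.ofList cs)
      · refine congrArg (List.map (fun cs => String.ofList cs)) (congrArg (List.map List.reverse) ?_)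
        rw [← hgf]
        apply List.filter_congr
        intro t ht
        simp only [Function.comp_apply]
        have hlen := pvGen_length_mem ht
        have hch := pvGen_chars ht
        have hkeep := pvKeep_rev (m+2) qi t hlen hch
        have hmem := pvMem_bad ((pvGen (m+2)).map List.reverse)
          ((PySem.List.pyRange 0 (((m+2):Nat):Int)).filter (fun j => decide (j ∉ qi))) t.reverse
        simp only [List.reverse_reverse] at hmem
        cases hp : pvPredL ((List.range (m+2)).map (fun (i:Nat) => decide ((i:Int) ∈ qi))) t with
        | false =>
          obtain ⟨k, hkb, hknot, hget⟩ := hkeep.mp hp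
          have : t.reverse ∈ ((pvGen (m+2)).map List.reverse).flatMap (fun s => (((PySem.List.pyRange 0 (((m+2):Nat):Int)).filter (fun j => decide (j ∉ qi))).filter (fun k => PySem.List.pyGet? s.reverse k == some '1')).map (fun _ => s)) :=
            hmem.mpr ⟨List.mem_map.mpr ⟨t, ht, rfl⟩, k, (hmemnu k).mpr ⟨hkb, hknot⟩, hget⟩
          exact decide_eq_false (fun h => h this)
        | true =>
          have : t.reverse ∉ ((pvGen (m+2)).map List.reverse).flatMap (fun s => (((PySem.List.pyRange 0 (((m+2):Nat):Int)).filter (fun j => decide (j ∉ qi))).filter (fun k => PySem.List.pyGet? s.reverse k == some '1')).map (fun _ => s)) := by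
            intro hin
            obtain ⟨-, k, hknu, hget⟩ := hmem.mp hin
            obtain ⟨hkb, hknot⟩ := (hmemnu k).mp hknu
            have : pvPredL ((List.range (m+2)).map (fun (i:Nat) => decide ((i:Int) ∈ qi))) t = false :=
              hkeep.mpr ⟨k, hkb, hknot, hget⟩
            rw [hp] at this
            simp at this
          exact decide_eq_true this
      · simp [List.map_map]
theorem get_classical_register_bitstrings_changed : Claim_changed_get_classical_register_bitstrings := by
  unfold Claim_changed_get_classical_register_bitstrings; decide
theorem get_classical_register_bitstrings_tight : Claim_exact_get_classical_register_bitstrings := by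
  intro qi qrs rv _ _ hD
  unfold D_get_classical_register_bitstrings at hD
  obtain ⟨h1, h0⟩ := hD
  have hn1 : (match qrs with | none => (qi.length : Int) | some k => k) = 1 := by
    rcases h1 with h | ⟨h, hlen⟩
    · rw [h]
    · rw [h]
      simp [hlen]
  unfold get_classical_register_bitstrings get_classical_register_bitstrings_alt
  rw [hn1]
  cases hb : (rv == some true) <;>
    simp [hb, h0, PySem.List.pyRange_one, List.range_succ]
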